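-- pv_equiv track=rewrite | github.com/DatHydroGuy/SortVis | SortVis.py | generate_colour_map
-- ===== SOURCE A (Python) =====
-- def generate_colour_map(num_elements):
--     colour_map = []
--     for i in range(127):
--         colour_map.insert(i, (128 + i, 0, 0))
--         colour_map.insert(2 * i + 1, (255, i, 0))
--         colour_map.insert(3 * i + 2, (255, 128 + i, 0))
--         colour_map.insert(4 * i + 3, (255, 255, 2 * i))
--     colour_map.insert(254, (255, 127, 0))
--     colour_map.append((255, 255, 255))
--     element_colours = []
--     for i in range(num_elements):
--         step = i * (len(colour_map) - 1) // (num_elements - 1)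
--         element_colours.append(colour_map[step])
--     return element_colours
-- ===== SOURCE B (Python) =====
-- def generate_colour_map(num_elements):
--     colour_map = (
--         [(128 + i, 0, 0) for i in range(127)]
--         + [(255, i, 0) for i in range(128)]
--         + [(255, 128 + i, 0) for i in range(127)]
--         + [(255, 255, 2 * i) for i in range(127)]
--         + [(255, 255, 255)]
--     )
--     last = len(colour_map) - 1
--     return [colour_map[i * last // (num_elements - 1)] for i in range(num_elements)]
-- ===== Notes on version B (the rewrite author's own statement) =====
-- stated objective: simpler
-- what changed: B builds the fixed 510-entry colour table by directly concatenating its four gradient segments (127+128+127+127 entries plus trailing white) instead of A's interleaved positional-insert loop, and samples it with a list comprehension.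
import Mathlib
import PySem

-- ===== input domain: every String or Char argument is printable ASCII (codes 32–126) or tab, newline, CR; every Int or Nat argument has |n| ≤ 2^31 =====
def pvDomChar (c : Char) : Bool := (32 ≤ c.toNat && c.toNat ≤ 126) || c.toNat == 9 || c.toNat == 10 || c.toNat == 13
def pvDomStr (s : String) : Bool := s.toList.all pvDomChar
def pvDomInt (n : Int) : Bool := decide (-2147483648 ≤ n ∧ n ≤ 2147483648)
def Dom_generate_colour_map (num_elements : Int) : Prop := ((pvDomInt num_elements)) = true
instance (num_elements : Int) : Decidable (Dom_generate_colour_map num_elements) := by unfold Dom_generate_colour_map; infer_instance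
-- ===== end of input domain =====

-- B builds the fixed 510-entry colour table by concatenating its four gradient segments directly
-- instead of A's interleaved insert trick; sampling is a map over range(num_elements). Objective: simpler.

-- ===== PORT A =====
-- A's colour table: 127 iterations of four position-computed inserts, then insert at 254, then append white.
def pvCmA : List (Int × Int × Int) :=
  PySem.List.insert
    ((PySem.List.pyRange 0 127 1).foldl (fun cm i =>
      PySem.List.insert (PySem.List.insert (PySem.List.insert (PySem.List.insert cm i
        (128 + i, 0, 0)) (2 * i + 1) (255, i, 0)) (3 * i + 2) (255, 128 + i, 0))
        (4 * i + 3) (255, 255, 2 * i)) [])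
    254 (255, 127, 0) ++ [(255, 255, 255)]

def generate_colour_map (num_elements : Int) : List (Int × Int × Int) :=
  -- the pyGetD default is unreachable under Pre_ (step is always in range when the loop runs)
  (PySem.List.pyRange 0 num_elements 1).foldl (fun acc i =>
    let step := PySem.Int.floordiv (i * ((pvCmA.length : Int) - 1)) (num_elements - 1)
    acc ++ [PySem.List.pyGetD pvCmA step (0, 0, 0)]) []

-- ===== PORT B =====
def pvCmB : List (Int × Int × Int) :=
  (PySem.List.pyRange 0 127 1).map (fun i => (128 + i, 0, 0))
    ++ (PySem.List.pyRange 0 128 1).map (fun i => (255, i, 0))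
    ++ (PySem.List.pyRange 0 127 1).map (fun i => (255, 128 + i, 0))
    ++ (PySem.List.pyRange 0 127 1).map (fun i => (255, 255, 2 * i))
    ++ [(255, 255, 255)]

def generate_colour_map_alt (num_elements : Int) : List (Int × Int × Int) :=
  let last : Int := (pvCmB.length : Int) - 1
  (PySem.List.pyRange 0 num_elements 1).map (fun i =>
    PySem.List.pyGetD pvCmB (PySem.Int.floordiv (i * last) (num_elements - 1)) (0, 0, 0))

-- ===== PRECONDITION & SPEC =====
-- Pre_ excludes num_elements = 1, on which A raises ZeroDivisionError (as does B).
def Pre_generate_colour_map (num_elements : Int) : Prop := num_elements ≠ 1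
instance (num_elements : Int) : Decidable (Pre_generate_colour_map num_elements) := by unfold Pre_generate_colour_map; infer_instance
def pvWitness_generate_colour_map : Int := (5)
def Spec_generate_colour_map (num_elements : Int) (out : List (Int × Int × Int)) : Prop := out = generate_colour_map_alt num_elements
instance (num_elements : Int) (out : List (Int × Int × Int)) : Decidable (Spec_generate_colour_map num_elements out) := by unfold Spec_generate_colour_map; infer_instance

-- ===== CLAIM (what is proved, stated in full; the proofs are below) =====
def Claim_equal_generate_colour_map : Prop := ∀ (num_elements : Int), Dom_generate_colour_map num_elements → Pre_generate_colour_map num_elements → Spec_generate_colour_map num_elements (generate_colour_map num_elements)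

-- ===== LEMMAS AND PROOFS =====
-- The four gradient segments, truncated to k entries (invariant state of A's insert loop).
def pvS1 (k : Nat) : List (Int × Int × Int) := (List.range k).map (fun j => (128 + (j : Int), 0, 0))
def pvS2 (k : Nat) : List (Int × Int × Int) := (List.range k).map (fun j => ((255 : Int), (j : Int), 0))
def pvS3 (k : Nat) : List (Int × Int × Int) := (List.range k).map (fun j => ((255 : Int), 128 + (j : Int), 0))
def pvS4 (k : Nat) : List (Int × Int × Int) := (List.range k).map (fun j => ((255 : Int), 255, 2 * (j : Int)))

theorem pvStep (k : Nat) :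
    PySem.List.insert (PySem.List.insert (PySem.List.insert (PySem.List.insert
      (pvS1 k ++ (pvS2 k ++ (pvS3 k ++ pvS4 k))) (k : Int) (128 + (k : Int), 0, 0))
      (2 * (k : Int) + 1) (255, (k : Int), 0))
      (3 * (k : Int) + 2) (255, 128 + (k : Int), 0))
      (4 * (k : Int) + 3) (255, 255, 2 * (k : Int))
    = pvS1 (k + 1) ++ (pvS2 (k + 1) ++ (pvS3 (k + 1) ++ pvS4 (k + 1))) := by
  have h1 : PySem.List.insert (pvS1 k ++ (pvS2 k ++ (pvS3 k ++ pvS4 k))) (k : Int)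
      (128 + (k : Int), 0, 0) = pvS1 (k + 1) ++ (pvS2 k ++ (pvS3 k ++ pvS4 k)) := by
    rw [PySem.List.insert_natCast _ k _ (by simp [pvS1, pvS2, pvS3, pvS4]),
        List.take_left' (by simp [pvS1]), List.drop_left' (by simp [pvS1])]
    simp [pvS1, List.range_succ]
  have e2 : (2 * (k : Int) + 1) = ((2 * k + 1 : Nat) : Int) := by push_cast; ring
  have h2 : PySem.List.insert (pvS1 (k + 1) ++ (pvS2 k ++ (pvS3 k ++ pvS4 k)))
      (2 * (k : Int) + 1) (255, (k : Int), 0)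
      = pvS1 (k + 1) ++ (pvS2 (k + 1) ++ (pvS3 k ++ pvS4 k)) := by
    rw [e2, show pvS1 (k + 1) ++ (pvS2 k ++ (pvS3 k ++ pvS4 k))
          = (pvS1 (k + 1) ++ pvS2 k) ++ (pvS3 k ++ pvS4 k) by simp,
        PySem.List.insert_natCast _ (2 * k + 1) _
          (by simp [pvS1, pvS2, pvS3, pvS4]; omega),
        List.take_left' (by simp [pvS1, pvS2]; omega), List.drop_left' (by simp [pvS1, pvS2]; omega)]
    simp [pvS2, List.range_succ]
  have e3 : (3 * (k : Int) + 2) = ((3 * k + 2 : Nat) : Int) := by push_cast; ring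
  have h3 : PySem.List.insert (pvS1 (k + 1) ++ (pvS2 (k + 1) ++ (pvS3 k ++ pvS4 k)))
      (3 * (k : Int) + 2) (255, 128 + (k : Int), 0)
      = pvS1 (k + 1) ++ (pvS2 (k + 1) ++ (pvS3 (k + 1) ++ pvS4 k)) := by
    rw [e3, show pvS1 (k + 1) ++ (pvS2 (k + 1) ++ (pvS3 k ++ pvS4 k))
          = (pvS1 (k + 1) ++ pvS2 (k + 1) ++ pvS3 k) ++ pvS4 k by simp,
        PySem.List.insert_natCast _ (3 * k + 2) _
          (by simp [pvS1, pvS2, pvS3, pvS4]; omega),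
        List.take_left' (by simp [pvS1, pvS2, pvS3]; omega),
        List.drop_left' (by simp [pvS1, pvS2, pvS3]; omega)]
    simp [pvS3, List.range_succ]
  have e4 : (4 * (k : Int) + 3) = ((4 * k + 3 : Nat) : Int) := by push_cast; ring
  have h4 : PySem.List.insert (pvS1 (k + 1) ++ (pvS2 (k + 1) ++ (pvS3 (k + 1) ++ pvS4 k)))
      (4 * (k : Int) + 3) (255, 255, 2 * (k : Int))
      = pvS1 (k + 1) ++ (pvS2 (k + 1) ++ (pvS3 (k + 1) ++ pvS4 (k + 1))) := by
    rw [e4, show pvS1 (k + 1) ++ (pvS2 (k + 1) ++ (pvS3 (k + 1) ++ pvS4 k))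
          = (pvS1 (k + 1) ++ pvS2 (k + 1) ++ pvS3 (k + 1) ++ pvS4 k) ++ [] by simp,
        PySem.List.insert_natCast _ (4 * k + 3) _
          (by simp [pvS1, pvS2, pvS3, pvS4]; omega),
        List.take_left' (by simp [pvS1, pvS2, pvS3, pvS4]; omega),
        List.drop_left' (by simp [pvS1, pvS2, pvS3, pvS4]; omega)]
    simp [pvS4, List.range_succ]
  rw [h1, h2, h3, h4]

theorem pvLoopA (k : Nat) :
    (PySem.List.pyRange 0 (k : Int) 1).foldl (fun cm i =>
      PySem.List.insert (PySem.List.insert (PySem.List.insert (PySem.List.insert cm i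
        (128 + i, 0, 0)) (2 * i + 1) (255, i, 0)) (3 * i + 2) (255, 128 + i, 0))
        (4 * i + 3) (255, 255, 2 * i)) []
    = pvS1 k ++ (pvS2 k ++ (pvS3 k ++ pvS4 k)) := by
  induction k with
  | zero => simp [pvS1, pvS2, pvS3, pvS4, PySem.List.pyRange_one_eq_nil]
  | succ k ih =>
    rw [show ((k + 1 : Nat) : Int) = (k : Int) + 1 by push_cast; ring,
        PySem.List.pyRange_one_succ_right (by positivity), List.foldl_append, ih]
    simpa using pvStep k

theorem pvCm_eq : pvCmA = pvCmB := by
  unfold pvCmA pvCmB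
  rw [show (127 : Int) = ((127 : Nat) : Int) by norm_num, pvLoopA 127]
  rw [show (254 : Int) = ((254 : Nat) : Int) by norm_num,
      show pvS1 127 ++ (pvS2 127 ++ (pvS3 127 ++ pvS4 127))
        = (pvS1 127 ++ pvS2 127) ++ (pvS3 127 ++ pvS4 127) by simp,
      PySem.List.insert_natCast _ 254 _ (by simp [pvS1, pvS2, pvS3, pvS4]),
      List.take_left' (by simp [pvS1, pvS2]), List.drop_left' (by simp [pvS1, pvS2])]
  rw [show (128 : Int) = ((128 : Nat) : Int) by norm_num]
  rw [PySem.List.pyRange_zero_nat]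
  rw [PySem.List.pyRange_zero_nat]
  have hs2 : List.range 128 = List.range 127 ++ [127] := by
    rw [show (128 : Nat) = 127 + 1 from rfl, List.range_succ]
  rw [hs2]
  simp [pvS1, pvS2, pvS3, pvS4, List.map_map, Function.comp_def, ← List.map_eq_flatMap]

-- ===== VERDICT (by name: the statement is the Claim_ definition above) =====
theorem generate_colour_map_spec : Claim_equal_generate_colour_map := by
  intro n _ _
  unfold Spec_generate_colour_map generate_colour_map generate_colour_map_alt
  rw [pvCm_eq, PySem.List.foldl_append_singleton_eq_map]
  simp
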